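-- pv_equiv track=rewrite | github.com/AzRea7/onehaven | onehaven_decision_engine/backend/app/services/jurisdiction_sla_service.py | _dedupe_sorted_categories
-- ===== SOURCE A (Python) =====
-- def _dedupe_sorted_categories(values: list[str] | None) -> list[str]:
--     seen: set[str] = set()
--     out: list[str] = []
--     for raw in list(values or []):
--         value = str(raw or "").strip().lower()
--         if not value or value in seen:
--             continue
--         seen.add(value)
--         out.append(value)
--     return sorted(out)
-- ===== SOURCE B (Python) =====
-- def _dedupe_sorted_categories(values):
--     cleaned = sorted(
--         v
--         for v in (str(raw or "").strip().lower() for raw in (values or []))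
--         if v
--     )
--     out = []
--     prev = None
--     for v in cleaned:
--         if v != prev:
--             out.append(v)
--             prev = v
--     return out
-- ===== Notes on version B (the rewrite author's own statement) =====
-- stated objective: idiomatic
-- what changed: B drops the 'seen' hash set entirely: it normalizes and filters in one comprehension, sorts the multiset (duplicates included), and deduplicates in a single pass by comparing each element with the previously kept one (sorted-adjacency dedup).
import Mathlib
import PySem

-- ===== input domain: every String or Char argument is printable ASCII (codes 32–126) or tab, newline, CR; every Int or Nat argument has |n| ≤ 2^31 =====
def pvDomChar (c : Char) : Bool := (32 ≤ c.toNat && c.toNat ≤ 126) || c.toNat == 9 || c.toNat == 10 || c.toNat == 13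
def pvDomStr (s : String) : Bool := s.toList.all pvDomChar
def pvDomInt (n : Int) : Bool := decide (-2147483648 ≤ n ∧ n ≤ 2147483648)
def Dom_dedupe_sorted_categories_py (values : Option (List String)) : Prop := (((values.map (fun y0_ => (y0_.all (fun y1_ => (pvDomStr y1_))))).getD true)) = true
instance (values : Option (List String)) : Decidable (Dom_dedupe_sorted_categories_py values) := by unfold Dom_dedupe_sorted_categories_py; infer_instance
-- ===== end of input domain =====

-- B replaces A's 'seen' hash set with sort-then-adjacent-dedup (idiomatic; same output, proved equal).


-- shared normalization step: str(raw or "").strip().lower()  (both Pythons contain this expression verbatim)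
def pvNorm (raw : String) : String :=
  PySem.Str.lower (PySem.Str.strip (if raw = "" then "" else raw))

-- ===== PORT A =====
def dedupe_sorted_categories_py (values : Option (List String)) : List String :=
  let st := (values.getD []).foldl
    (fun (st : PySem.Set String × List String) raw =>
      let value := pvNorm raw
      if value = "" ∨ value ∈ st.1 then st
      else (PySem.Set.add st.1 value, st.2 ++ [value]))
    (PySem.Set.empty, [])
  PySem.List.sorted st.2 (fun x => x) false

-- ===== PORT B =====
def dedupe_sorted_categories_py_alt (values : Option (List String)) : List String :=
  let cleaned := PySem.List.sorted (((values.getD []).map pvNorm).filter (fun v => v ≠ "")) (fun x => x) false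
  (cleaned.foldl
    (fun (st : List String × Option String) v =>
      if some v ≠ st.2 then (st.1 ++ [v], some v) else st)
    ([], none)).1

-- ===== PRECONDITION & SPEC =====
def Spec_dedupe_sorted_categories_py (values : Option (List String)) (out : List String) : Prop := out = dedupe_sorted_categories_py_alt values
instance (values : Option (List String)) (out : List String) : Decidable (Spec_dedupe_sorted_categories_py values out) := by unfold Spec_dedupe_sorted_categories_py; infer_instance

-- ===== CLAIM (what is proved, stated in full; the proofs are below) =====
def Claim_equal_dedupe_sorted_categories_py : Prop := ∀ (values : Option (List String)), Dom_dedupe_sorted_categories_py values → Spec_dedupe_sorted_categories_py values (dedupe_sorted_categories_py values)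

-- ===== LEMMAS AND PROOFS =====

-- structural form of B's adjacency-dedup loop
def pvChainDedup : Option String → List String → List String
  | _, [] => []
  | prev, x :: xs => if some x ≠ prev then x :: pvChainDedup (some x) xs else pvChainDedup prev xs

theorem pvChainDedup_cons (prev : Option String) (x : String) (xs : List String) :
    pvChainDedup prev (x :: xs)
      = if some x ≠ prev then x :: pvChainDedup (some x) xs else pvChainDedup prev xs := rfl

theorem pvFoldl_eq_chainDedup (xs : List String) (out : List String) (prev : Option String) :
    (xs.foldl (fun (st : List String × Option String) v =>
        if some v ≠ st.2 then (st.1 ++ [v], some v) else st) (out, prev)).1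
      = out ++ pvChainDedup prev xs := by
  induction xs generalizing out prev with
  | nil => simp [pvChainDedup]
  | cons x xs ih =>
    rw [List.foldl_cons, pvChainDedup_cons]
    by_cases h : some x = prev
    · rw [if_neg (not_not_intro h), if_neg (not_not_intro h), ih]
    · rw [if_pos h, if_pos h, ih, List.append_assoc, List.singleton_append]

theorem pvChainDedup_some_spec (s : List String) (p : String)
    (hs : s.Pairwise (fun a b => a ≤ b)) (hp : ∀ y ∈ s, p ≤ y) :
    (pvChainDedup (some p) s).Pairwise (fun a b => a < b) ∧
    (∀ x, x ∈ pvChainDedup (some p) s ↔ x ∈ s ∧ x ≠ p) ∧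
    (∀ y ∈ pvChainDedup (some p) s, p < y) := by
  induction s generalizing p with
  | nil => simp [pvChainDedup]
  | cons a t ih =>
    rcases List.pairwise_cons.mp hs with ⟨ha, ht⟩
    by_cases hap : a = p
    · subst hap
      have := ih a ht ha
      simp only [pvChainDedup, ne_eq, not_true_eq_false, if_false]
      refine ⟨this.1, fun x => ?_, this.2.2⟩
      rw [this.2.1 x]
      simp only [List.mem_cons]
      tauto
    · have hpa : p < a := lt_of_le_of_ne (hp a (List.mem_cons_self)) (fun h => hap h.symm)
      have := ih a ht ha
      simp only [pvChainDedup, ne_eq, Option.some.injEq, hap, not_false_eq_true, if_true]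
      refine ⟨?_, fun x => ?_, ?_⟩
      · exact List.pairwise_cons.mpr ⟨this.2.2, this.1⟩
      · constructor
        · intro hx
          rcases List.mem_cons.mp hx with hx | hx
          · subst hx; exact ⟨List.mem_cons_self, fun h => hap h⟩
          · rcases (this.2.1 x).mp hx with ⟨hxt, _⟩
            have : p < x := lt_of_lt_of_le hpa (ha x hxt)
            exact ⟨List.mem_cons_of_mem _ hxt, ne_of_gt this⟩
        · rintro ⟨hx, hxp⟩
          rcases List.mem_cons.mp hx with hx | hx
          · subst hx; exact List.mem_cons_self
          · by_cases hxa : x = a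
            · subst hxa; exact List.mem_cons_self
            · exact List.mem_cons_of_mem _ ((this.2.1 x).mpr ⟨hx, hxa⟩)
      · intro y hy
        rcases List.mem_cons.mp hy with hy | hy
        · subst hy; exact hpa
        · exact lt_trans hpa ((this.2.2 y hy))

theorem pvChainDedup_none_spec (s : List String)
    (hs : s.Pairwise (fun a b => a ≤ b)) :
    (pvChainDedup none s).Pairwise (fun a b => a < b) ∧
    (∀ x, x ∈ pvChainDedup none s ↔ x ∈ s) := by
  cases s with
  | nil => simp [pvChainDedup]
  | cons a t =>
    rcases List.pairwise_cons.mp hs with ⟨ha, ht⟩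
    have H := pvChainDedup_some_spec t a ht ha
    simp only [pvChainDedup, ne_eq, reduceCtorEq, not_false_eq_true, if_true]
    refine ⟨List.pairwise_cons.mpr ⟨H.2.2, H.1⟩, fun x => ?_⟩
    constructor
    · intro hx
      rcases List.mem_cons.mp hx with hx | hx
      · subst hx; exact List.mem_cons_self
      · exact List.mem_cons_of_mem _ ((H.2.1 x).mp hx).1
    · intro hx
      rcases List.mem_cons.mp hx with hx | hx
      · subst hx; exact List.mem_cons_self
      · by_cases hxa : x = a
        · subst hxa; exact List.mem_cons_self
        · exact List.mem_cons_of_mem _ ((H.2.1 x).mpr ⟨hx, hxa⟩)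

-- invariant for A's loop: out stays duplicate-free and collects exactly the
-- nonempty normalized values, provided seen and out hold the same elements
theorem pvA_loop_spec (l : List String) (seen : PySem.Set String) (out : List String)
    (hn : out.Nodup) (hseen : ∀ x, x ∈ seen ↔ x ∈ out) :
    let st := l.foldl
      (fun (st : PySem.Set String × List String) raw =>
        let value := pvNorm raw
        if value = "" ∨ value ∈ st.1 then st
        else (PySem.Set.add st.1 value, st.2 ++ [value])) (seen, out)
    st.2.Nodup ∧ (∀ x, x ∈ st.2 ↔ x ∈ out ∨ (∃ raw ∈ l, pvNorm raw = x ∧ x ≠ "")) := by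
  induction l generalizing seen out with
  | nil => simp [hn]
  | cons r l ih =>
    simp only [List.foldl_cons]
    by_cases hc : pvNorm r = "" ∨ pvNorm r ∈ seen
    · simp only [hc, if_true]
      have H := ih seen out hn hseen
      refine ⟨H.1, fun x => ?_⟩
      rw [H.2 x]
      constructor
      · rintro (hx | ⟨raw, hraw, hh⟩)
        · exact Or.inl hx
        · exact Or.inr ⟨raw, List.mem_cons_of_mem _ hraw, hh⟩
      · rintro (hx | ⟨raw, hraw, hh⟩)
        · exact Or.inl hx
        · rcases List.mem_cons.mp hraw with hr | hr
          · subst hr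
            rcases hc with hc | hc
            · exact absurd (hc.symm.trans hh.1).symm hh.2
            · exact Or.inl (hh.1 ▸ (hseen _).mp hc)
          · exact Or.inr ⟨raw, hr, hh⟩
    · rw [not_or] at hc
      simp only [hc.1, hc.2, false_or, if_false]
      have hnotout : pvNorm r ∉ out := fun h => hc.2 ((hseen _).mpr h)
      have hn' : (out ++ [pvNorm r]).Nodup := by
        refine List.Nodup.append hn (List.nodup_singleton _) ?_
        intro a ha hb
        rw [List.mem_singleton] at hb
        exact hnotout (hb ▸ ha)
      have hseen' : ∀ x, x ∈ PySem.Set.add seen (pvNorm r) ↔ x ∈ out ++ [pvNorm r] := by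
        intro x
        rw [PySem.Set.mem_add, hseen x]
        simp only [List.mem_append, List.mem_singleton]
      have H := ih _ _ hn' hseen'
      refine ⟨H.1, fun x => ?_⟩
      rw [H.2 x]
      simp only [List.mem_append, List.mem_singleton]
      constructor
      · rintro ((hx | hx) | ⟨raw, hraw, hh⟩)
        · exact Or.inl hx
        · exact Or.inr ⟨r, List.mem_cons_self, hx.symm, hx ▸ hc.1⟩
        · exact Or.inr ⟨raw, List.mem_cons_of_mem _ hraw, hh⟩
      · rintro (hx | ⟨raw, hraw, hh⟩)
        · exact Or.inl (Or.inl hx)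
        · rcases List.mem_cons.mp hraw with hr | hr
          · exact Or.inl (Or.inr (hr ▸ hh.1).symm)
          · exact Or.inr ⟨raw, hr, hh⟩

theorem pvB_eq (values : Option (List String)) :
    dedupe_sorted_categories_py_alt values
      = pvChainDedup none (PySem.List.sorted (((values.getD []).map pvNorm).filter (fun v => v ≠ "")) (fun x => x) false) := by
  simp only [dedupe_sorted_categories_py_alt]
  rw [pvFoldl_eq_chainDedup, List.nil_append]

theorem pv_main (values : Option (List String)) :
    dedupe_sorted_categories_py values = dedupe_sorted_categories_py_alt values := by
  have HA := pvA_loop_spec (values.getD []) PySem.Set.empty [] List.nodup_nil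
    (fun x => by simp [PySem.Set.empty])
  set st := (values.getD []).foldl
      (fun (st : PySem.Set String × List String) raw =>
        let value := pvNorm raw
        if value = "" ∨ value ∈ st.1 then st
        else (PySem.Set.add st.1 value, st.2 ++ [value])) (PySem.Set.empty, []) with hst
  have hcp := PySem.List.sorted_pairwise (((values.getD []).map pvNorm).filter (fun v => v ≠ "")) (fun x => x)
  have HB := pvChainDedup_none_spec _ hcp
  have hmem : ∀ x, x ∈ pvChainDedup none (PySem.List.sorted (((values.getD []).map pvNorm).filter (fun v => v ≠ "")) (fun x => x) false) ↔ x ∈ st.2 := by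
    intro x
    rw [HB.2 x, HA.2 x, PySem.List.mem_sorted]
    simp only [List.mem_filter, List.mem_map, List.not_mem_nil, false_or, decide_eq_true_eq,
      ne_eq]
    constructor
    · rintro ⟨⟨a, ha, hax⟩, hx⟩; exact ⟨a, ha, hax, hx⟩
    · rintro ⟨a, ha, hax, hx⟩; exact ⟨⟨a, ha, hax⟩, hx⟩
  have hnodupB := HB.1.imp (fun h => ne_of_lt h)
  have hperm := (List.perm_ext_iff_of_nodup hnodupB HA.1).mpr hmem
  rw [pvB_eq]
  show PySem.List.sorted st.2 (fun x => x) false = _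
  exact PySem.List.sorted_eq_of_perm_of_pairwise_lt st.2 _ (fun x => x) hperm HB.1

-- ===== VERDICT (by name: the statement is the Claim_ definition above) =====
theorem dedupe_sorted_categories_py_spec : Claim_equal_dedupe_sorted_categories_py := by
  intro values _
  show dedupe_sorted_categories_py values = dedupe_sorted_categories_py_alt values
  exact pv_main values
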